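-- pv_equiv track=rewrite | github.com/tomboxfan/PythonExample | exercise/python_1004_practice_add_number_practice_018.py | solution1_math
-- ===== SOURCE A (Python) =====
-- def solution1_math(base_number:int, term_count:int) -> int:
--     '''
--     Use math to calculate the number in each term
--     '''
--
--     # time complexity - O(n^2)
--     sum = 0
--     for term_no in range(term_count):
--
--         # Step 1) Calculate value_for_this_term
--
--         # term 0 - 5
--         #               Loop 0 times [ * 10 + 5]
--
--         # term 1 - 55 = 5 * 10 + 5
--         #               Loop 1 times [ * 10 + 5]
--
--         # term 2 - 555 = (5 * 10 + 5) * 10 + 5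
--         #               Loop 2 times [ * 10 + 5]
--
--         # term 3 - 5555 = ((5 * 10 + 5) * 10 + 5) * 10 + 5
--         #               Loop 3 times [ * 10 + 5]
--
--         value_for_this_term = base_number
--
--         # "_" is throwaway variable - we don't need this variable, we want to ignore it
--         for _ in range(term_no):
--             value_for_this_term = value_for_this_term * 10 + base_number
--
--         sum = sum + value_for_this_term
--
--     return sum
-- ===== SOURCE B (Python) =====
-- def solution1_math(base_number: int, term_count: int) -> int:
--     total = 0
--     term = 0
--     for _ in range(term_count):
--         term = term * 10 + base_number
--         total = total + term
--     return total
-- ===== Notes on version B (the rewrite author's own statement) =====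
-- stated objective: faster
-- what changed: Replaces the per-term inner loop (rebuilding each repdigit term from scratch) by a single pass that derives each term from the previous one (term = term*10 + base) while accumulating the sum.
import Mathlib
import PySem

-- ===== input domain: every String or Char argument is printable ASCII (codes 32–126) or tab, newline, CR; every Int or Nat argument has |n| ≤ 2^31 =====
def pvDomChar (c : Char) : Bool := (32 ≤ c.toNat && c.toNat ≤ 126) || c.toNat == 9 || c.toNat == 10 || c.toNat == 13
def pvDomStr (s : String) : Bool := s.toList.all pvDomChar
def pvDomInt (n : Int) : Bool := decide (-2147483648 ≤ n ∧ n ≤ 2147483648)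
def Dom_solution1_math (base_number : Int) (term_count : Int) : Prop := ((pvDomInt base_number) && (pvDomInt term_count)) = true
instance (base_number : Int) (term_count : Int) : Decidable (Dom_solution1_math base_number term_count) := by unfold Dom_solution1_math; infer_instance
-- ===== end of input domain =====

-- B replaces A's quadratic inner-loop recomputation of each repdigit term by a single
-- pass deriving each term from the previous one (term = term*10 + base); faster (asymptotic).

-- ===== PORT A =====
-- A's inner 'for _ in range(term_no)' is a counted loop whose body ignores the
-- loop variable; it is ported as the same counted repetition of the body.
def pvInnerA (base_number : Int) : Nat → Int → Int
  | 0, value_for_this_term => value_for_this_term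
  | n + 1, value_for_this_term => pvInnerA base_number n (value_for_this_term * 10 + base_number)

def solution1_math (base_number : Int) (term_count : Int) : Int :=
  (PySem.List.pyRange 0 term_count 1).foldl
    (fun sum term_no => sum + pvInnerA base_number term_no.toNat base_number)
    0

-- ===== PORT B =====
def solution1_math_alt (base_number : Int) (term_count : Int) : Int :=
  ((PySem.List.pyRange 0 term_count 1).foldl
    (fun (st : Int × Int) _ =>
      (st.1 + (st.2 * 10 + base_number), st.2 * 10 + base_number))
    (0, 0)).1

-- ===== PRECONDITION & SPEC =====
def Spec_solution1_math (base_number : Int) (term_count : Int) (out : Int) : Prop := out = solution1_math_alt base_number term_count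
instance (base_number : Int) (term_count : Int) (out : Int) : Decidable (Spec_solution1_math base_number term_count out) := by unfold Spec_solution1_math; infer_instance

-- ===== CLAIM (what is proved, stated in full; the proofs are below) =====
def Claim_equal_solution1_math : Prop := ∀ (base_number : Int) (term_count : Int), Dom_solution1_math base_number term_count → Spec_solution1_math base_number term_count (solution1_math base_number term_count)

-- ===== LEMMAS AND PROOFS =====

-- nth repdigit term: pvT b 0 = 0, pvT b (n+1) = pvT b n * 10 + b
def pvT (b : Int) : Nat → Int
  | 0 => 0
  | n + 1 => pvT b n * 10 + b

-- A's counted inner loop, run n times from the nth term, lands on the (n+k)th term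
theorem pv_inner (b : Int) (n k : Nat) :
    pvInnerA b n (pvT b k) = pvT b (n + k) := by
  induction n generalizing k with
  | zero => simp [pvInnerA]
  | succ m ih =>
    have h : pvT b k * 10 + b = pvT b (k + 1) := rfl
    rw [pvInnerA, h, ih]
    congr 1
    omega

theorem pv_inner_base (b : Int) (n : Nat) :
    pvInnerA b n b = pvT b (n + 1) := by
  have h := pv_inner b n 1
  simpa [pvT] using h

-- B's loop invariant: after n steps the state is (sum of first n terms, nth term)
theorem pv_B_inv (b : Int) (n : Nat) :
    (PySem.List.pyRange 0 (n : Int) 1).foldl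
      (fun (st : Int × Int) _ => (st.1 + (st.2 * 10 + b), st.2 * 10 + b)) (0, 0)
    = ((List.range n).foldl (fun s k => s + pvT b (k + 1)) 0, pvT b n) := by
  induction n with
  | zero => simp [pvT]
  | succ k ih =>
    have h : ((k : Int) + 1) = ((k + 1 : Nat) : Int) := by push_cast; ring
    rw [← h, PySem.List.pyRange_one_succ_right (by positivity), List.foldl_append, ih,
      List.range_succ, List.foldl_append]
    simp [pvT]

theorem pv_A_sum (b : Int) (n : Nat) :
    (PySem.List.pyRange 0 (n : Int) 1).foldl
      (fun sum i => sum + pvInnerA b i.toNat b) 0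
    = (List.range n).foldl (fun s k => s + pvT b (k + 1)) 0 := by
  induction n with
  | zero => simp
  | succ k ih =>
    have h : ((k : Int) + 1) = ((k + 1 : Nat) : Int) := by push_cast; ring
    rw [← h, PySem.List.pyRange_one_succ_right (by positivity), List.foldl_append, ih,
      List.range_succ, List.foldl_append]
    simp only [List.foldl]
    rw [Int.toNat_natCast, pv_inner_base]

-- ===== VERDICT (by name: the statement is the Claim_ definition above) =====
theorem solution1_math_spec : Claim_equal_solution1_math := by
  intro b t _
  unfold Spec_solution1_math solution1_math solution1_math_alt
  by_cases ht : t ≤ 0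
  · rw [PySem.List.pyRange_one_eq_nil ht]; rfl
  · have h : t = ((t.toNat : Nat) : Int) := by omega
    rw [h, pv_A_sum, pv_B_inv]
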